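-- pv_equiv track=rewrite | github.com/egorka-angelskiy/VK | PARTA/calls/utilits.py | udpate_data
-- ===== SOURCE A (Python) =====
-- def udpate_data(form, table_name):
-- 	query = f"""update {table_name} set """
-- 	for i, key in enumerate(list(form)[1:]):
-- 		if i == len(list(form)[1:]) - 1:
-- 			query += f"""{key}='{form[key]}' """
-- 		else:
-- 			query += f"""{key}='{form[key]}', """
--
-- 	query += f"""where student_id='{form['student_id']}';"""
-- 	return query
-- ===== SOURCE B (Python) =====
-- def udpate_data(form, table_name):
--     # single pass with a "pending fragment" buffer: each column's fragment is
--     # held back and flushed with ", " when the next column arrives, then the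
--     # last pending fragment is flushed with a trailing space.
--     pieces = [f"update {table_name} set "]
--     pending = None
--     for key in list(form)[1:]:
--         if pending is not None:
--             pieces.append(pending + ", ")
--         pending = f"{key}='{form[key]}'"
--     if pending is not None:
--         pieces.append(pending + " ")
--     pieces.append(f"where student_id='{form['student_id']}';")
--     return "".join(pieces)
-- ===== Notes on version B (the rewrite author's own statement) =====
-- stated objective: alternative
-- what changed: B makes a single streaming pass with a pending-fragment buffer (flushing the previous fragment with ', ' when the next key arrives and the last one with a space) and joins the collected pieces once, instead of A's enumerate loop that recomputes list(form)[1:] and its length on every iteration to special-case the last separator via an index test.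
import Mathlib
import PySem

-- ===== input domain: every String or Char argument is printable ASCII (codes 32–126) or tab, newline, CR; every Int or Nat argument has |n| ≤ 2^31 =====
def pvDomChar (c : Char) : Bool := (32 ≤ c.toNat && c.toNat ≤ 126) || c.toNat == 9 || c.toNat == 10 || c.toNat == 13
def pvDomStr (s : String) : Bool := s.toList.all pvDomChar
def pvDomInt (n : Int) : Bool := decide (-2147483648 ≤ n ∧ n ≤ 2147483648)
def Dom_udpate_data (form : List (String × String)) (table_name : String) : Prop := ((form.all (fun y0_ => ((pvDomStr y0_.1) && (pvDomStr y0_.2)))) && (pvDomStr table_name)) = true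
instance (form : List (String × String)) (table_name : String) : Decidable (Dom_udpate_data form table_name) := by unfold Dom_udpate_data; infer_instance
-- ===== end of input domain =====

-- B replaces A's indexed loop (which recomputes list(form)[1:] and its length each
-- iteration to special-case the last separator) by a single streaming pass with a
-- pending-fragment buffer that is flushed piece by piece and joined once.

-- ===== PORT A =====
-- literal transliteration of A: the dict `form` is PySem.Dict.ofList form;
-- list(form)[1:] is the keys list dropped by one; form[key] under Pre_ (key present)
-- is getD with an unreachable default.
def udpate_data (form : List (String × String)) (table_name : String) : String :=
  let d := PySem.Dict.ofList form
  let query := "update " ++ table_name ++ " set "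
  let keys1 := d.keys.drop 1
  let query := (PySem.List.enumerate keys1).foldl (fun q ik =>
      if ik.1 = (keys1.length : Int) - 1 then
        q ++ ik.2 ++ "='" ++ d.getD ik.2 "" ++ "' "
      else
        q ++ ik.2 ++ "='" ++ d.getD ik.2 "" ++ "', ") query
  query ++ "where student_id='" ++ d.getD "student_id" "" ++ "';"

-- ===== PORT B =====
-- literal transliteration of Source B: one pass with state (pieces, pending);
-- the previous fragment is flushed with ", " when a new key arrives, the last
-- pending fragment is flushed with " ", and the pieces are joined once at the end.
def udpate_data_alt (form : List (String × String)) (table_name : String) : String :=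
  let d := PySem.Dict.ofList form
  let st := (d.keys.drop 1).foldl
      (fun (st : List String × Option String) key =>
        ((match st.2 with
          | some p => st.1 ++ [p ++ ", "]
          | none => st.1),
         some (key ++ "='" ++ d.getD key "" ++ "'")))
      (["update " ++ table_name ++ " set "], none)
  let pieces := (match st.2 with
    | some p => st.1 ++ [p ++ " "]
    | none => st.1)
  PySem.Str.join "" (pieces ++ ["where student_id='" ++ d.getD "student_id" "" ++ "';"])

-- ===== PRECONDITION & SPEC =====
-- Pre_ excludes exactly the inputs whose dict has no key 'student_id': there
-- form['student_id'] raises KeyError in A (and in B alike).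
def Pre_udpate_data (form : List (String × String)) (table_name : String) : Prop :=
  "student_id" ∈ form.map Prod.fst
instance (form : List (String × String)) (table_name : String) : Decidable (Pre_udpate_data form table_name) := by unfold Pre_udpate_data; infer_instance

def pvWitness_udpate_data : (List (String × String)) × String :=
  ([("student_id", "1"), ("name", "Bob")], "students")

def Spec_udpate_data (form : List (String × String)) (table_name : String) (out : String) : Prop := out = udpate_data_alt form table_name
instance (form : List (String × String)) (table_name : String) (out : String) : Decidable (Spec_udpate_data form table_name out) := by unfold Spec_udpate_data; infer_instance

-- ===== CLAIM (what is proved, stated in full; the proofs are below) =====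
def Claim_equal_udpate_data : Prop := ∀ (form : List (String × String)) (table_name : String), Dom_udpate_data form table_name → Pre_udpate_data form table_name → Spec_udpate_data form table_name (udpate_data form table_name)

-- ===== LEMMAS AND PROOFS =====

-- the common rendered body of the SET clause: every fragment followed by ", "
-- except the last, which is followed by " "
def pvBody (d : PySem.Dict String String) : List String → String
  | [] => ""
  | [k] => k ++ "='" ++ d.getD k "" ++ "'" ++ " "
  | k :: k' :: r => k ++ "='" ++ d.getD k "" ++ "'" ++ ", " ++ pvBody d (k' :: r)

-- A's enumerate loop equals the rendered body appended to the accumulator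
theorem loopA_eq_body (d : PySem.Dict String String) (n : Int) :
    ∀ (ks : List String) (j : Int) (q : String), j + ks.length = n →
      (PySem.List.enumerate ks j).foldl (fun q ik =>
          if ik.1 = n - 1 then q ++ ik.2 ++ "='" ++ d.getD ik.2 "" ++ "' "
          else q ++ ik.2 ++ "='" ++ d.getD ik.2 "" ++ "', ") q
        = q ++ pvBody d ks := by
  intro ks
  induction ks with
  | nil =>
      intro j q _
      rw [← String.toList_inj]
      simp [PySem.List.enumerate, pvBody]
  | cons k ks ih =>
      intro j q hj
      cases ks with
      | nil =>
          have hjn : j = n - 1 := by simp at hj; omega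
          rw [← String.toList_inj]
          simp [PySem.List.enumerate, hjn, pvBody]
      | cons k' ks' =>
          have hne : j ≠ n - 1 := by
            simp only [List.length_cons] at hj; push_cast at hj; omega
          have hrec := ih (j + 1) (q ++ k ++ "='" ++ d.getD k "" ++ "', ") (by
            simp only [List.length_cons] at hj ⊢; push_cast at hj ⊢; omega)
          simp only [PySem.List.enumerate, List.foldl_cons, if_neg hne] at *
          rw [hrec, ← String.toList_inj]
          simp [pvBody, List.append_assoc]

-- concatenation of a list of strings (what "".join computes), list-side
def pvCat (l : List String) : List Char := (l.map String.toList).flatten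

theorem join_empty_eq_cat (l : List String) :
    (PySem.Str.join "" l).toList = pvCat l := by
  induction l with
  | nil => simp [PySem.Str.join, PySem.Chars.join, List.intercalate, pvCat]
  | cons x l ih =>
      cases l with
      | nil => simp [PySem.Str.join, PySem.Chars.join, List.intercalate, pvCat]
      | cons y l' =>
          rw [PySem.Str.toList_join] at ih ⊢
          simp only [List.map_cons]
          rw [show ("" : String).toList = ([] : List Char) from rfl] at ih ⊢
          simp only [List.map_cons] at ih
          rw [PySem.Chars.join_cons_cons, ih]
          simp [pvCat]

-- the contribution of the remaining keys given the current pending buffer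
def pvTail (d : PySem.Dict String String) (pend : Option String) (ks : List String) : List Char :=
  match pend, ks with
  | none, _ => (pvBody d ks).toList
  | some p, [] => p.toList ++ [' ']
  | some p, _ :: _ => p.toList ++ (", ").toList ++ (pvBody d ks).toList

-- B's fold: concatenating the flushed pieces equals concatenating the initial
-- pieces and the contribution of the pending buffer and remaining keys
theorem loopB_eq_body (d : PySem.Dict String String) :
    ∀ (ks : List String) (ps : List String) (pend : Option String),
      pvCat (match (ks.foldl
          (fun (st : List String × Option String) key =>
            ((match st.2 with
              | some p => st.1 ++ [p ++ ", "]
              | none => st.1),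
             some (key ++ "='" ++ d.getD key "" ++ "'"))) (ps, pend)).2 with
        | some p => (ks.foldl
          (fun (st : List String × Option String) key =>
            ((match st.2 with
              | some p => st.1 ++ [p ++ ", "]
              | none => st.1),
             some (key ++ "='" ++ d.getD key "" ++ "'"))) (ps, pend)).1 ++ [p ++ " "]
        | none => (ks.foldl
          (fun (st : List String × Option String) key =>
            ((match st.2 with
              | some p => st.1 ++ [p ++ ", "]
              | none => st.1),
             some (key ++ "='" ++ d.getD key "" ++ "'"))) (ps, pend)).1)
      = pvCat ps ++ pvTail d pend ks := by
  intro ks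
  induction ks with
  | nil =>
      intro ps pend
      cases pend with
      | none => simp [pvTail, pvBody, pvCat]
      | some p => simp [pvTail, pvCat]
  | cons k r ih =>
      intro ps pend
      simp only [List.foldl_cons]
      cases pend with
      | none =>
          rw [ih]
          cases r with
          | nil => simp [pvTail, pvBody, pvCat]
          | cons k' r' => simp [pvTail, pvBody, pvCat, List.append_assoc]
      | some p =>
          rw [ih]
          cases r with
          | nil => simp [pvTail, pvBody, pvCat, List.append_assoc]
          | cons k' r' => simp [pvTail, pvBody, pvCat, List.append_assoc]

-- ===== VERDICT (by name: the statement is the Claim_ definition above) =====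
theorem udpate_data_spec : Claim_equal_udpate_data := by
  intro form table_name _ _
  unfold Spec_udpate_data
  simp only [udpate_data, udpate_data_alt]
  set d := PySem.Dict.ofList form with hd
  set ks := d.keys.drop 1 with hks
  rw [loopA_eq_body d (ks.length : Int) ks 0 _ (by simp)]
  rw [← String.toList_inj, join_empty_eq_cat]
  rw [pvCat, List.map_append, List.flatten_append, ← pvCat]
  rw [loopB_eq_body d ks ["update " ++ table_name ++ " set "] none]
  simp [pvTail, pvCat]
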